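-- pv_equiv track=rewrite | github.com/KreoManser/ITIS-PROG | HW3/main.py | f9
-- ===== SOURCE A (Python) =====
-- def f9(test: int) -> str:
--     stroke_list = []
--     i = 1
--     while test > 0:
--         stroke_list.append(test % 10 * i)
--         test //= 10
--         i *= 10
--     stroke = " + ".join(str(num) for num in stroke_list[::-1])
--     return stroke
-- ===== SOURCE B (Python) =====
-- def f9(test: int) -> str:
--     def terms(n):
--         if n <= 0:
--             return []
--         return [t * 10 for t in terms(n // 10)] + [n % 10]
--     return " + ".join(str(t) for t in terms(test))
-- ===== Notes on version B (the rewrite author's own statement) =====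
-- stated objective: alternative
-- what changed: Replaces the while loop that accumulates least-significant terms with a growing multiplier and then reverses, by a recursion that builds the place-value terms most-significant-first directly (scaling the recursive result by 10), with no reversal and no multiplier state.
import Mathlib
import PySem

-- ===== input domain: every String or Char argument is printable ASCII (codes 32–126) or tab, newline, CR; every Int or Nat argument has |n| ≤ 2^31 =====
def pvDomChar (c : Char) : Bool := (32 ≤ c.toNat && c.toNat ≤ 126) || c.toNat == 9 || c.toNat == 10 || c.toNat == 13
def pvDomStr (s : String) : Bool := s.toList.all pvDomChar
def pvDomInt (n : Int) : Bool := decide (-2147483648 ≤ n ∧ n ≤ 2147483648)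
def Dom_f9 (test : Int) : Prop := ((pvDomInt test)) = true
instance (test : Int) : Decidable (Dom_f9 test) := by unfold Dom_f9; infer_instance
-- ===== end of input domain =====

-- B replaces A's least-significant-first while loop (multiplier state + final reversal)
-- by a recursion that yields the place-value terms most-significant-first directly; alternative, not faster.

-- ===== PORT A =====
-- the while loop: state (test, i, stroke_list)
def f9Loop (test i : Int) (acc : List Int) : List Int :=
  if test > 0 then
    f9Loop (PySem.Int.floordiv test 10) (i * 10) (acc ++ [PySem.Int.mod test 10 * i])
  else acc
termination_by test.toNat
decreasing_by
  have h10 : PySem.Int.floordiv test 10 = test / 10 := PySem.Int.floordiv_eq_ediv_of_pos (by omega)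
  rw [h10]; omega

def f9 (test : Int) : String :=
  let strokeList := f9Loop test 1 []
  -- stroke_list[::-1] is the full reversed copy
  PySem.Str.join " + " (strokeList.reverse.map PySem.Int.toStr)

-- ===== PORT B =====
def f9Terms (n : Int) : List Int :=
  if n ≤ 0 then []
  else (f9Terms (PySem.Int.floordiv n 10)).map (· * 10) ++ [PySem.Int.mod n 10]
termination_by n.toNat
decreasing_by
  have h10 : PySem.Int.floordiv n 10 = n / 10 := PySem.Int.floordiv_eq_ediv_of_pos (by omega)
  rw [h10]; omega

def f9_alt (test : Int) : String :=
  PySem.Str.join " + " ((f9Terms test).map PySem.Int.toStr)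

-- ===== PRECONDITION & SPEC =====
def Spec_f9 (test : Int) (out : String) : Prop := out = f9_alt test
instance (test : Int) (out : String) : Decidable (Spec_f9 test out) := by unfold Spec_f9; infer_instance

-- ===== CLAIM (what is proved, stated in full; the proofs are below) =====
def Claim_equal_f9 : Prop := ∀ (test : Int), Dom_f9 test → Spec_f9 test (f9 test)

-- ===== LEMMAS AND PROOFS =====

-- the loop, from any accumulator, appends B's term list (scaled by the current
-- multiplier) in reversed order
theorem f9Loop_eq_terms (k : Nat) : ∀ (n i : Int) (acc : List Int), n.toNat ≤ k →
    f9Loop n i acc = acc ++ ((f9Terms n).map (· * i)).reverse := by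
  induction k with
  | zero =>
      intro n i acc hk
      have hn : ¬ n > 0 := by omega
      rw [f9Loop, if_neg hn, f9Terms, if_pos (by omega)]
      simp
  | succ k ih =>
      intro n i acc hk
      by_cases h : n > 0
      · have h10 : PySem.Int.floordiv n 10 = n / 10 :=
          PySem.Int.floordiv_eq_ediv_of_pos (by omega)
        have hb : (PySem.Int.floordiv n 10).toNat ≤ k := by
          rw [h10, Int.toNat_le]; omega
        rw [f9Loop, if_pos h, ih _ _ _ hb]
        conv_rhs => rw [f9Terms, if_neg (by omega)]
        have hmap : ((f9Terms (PySem.Int.floordiv n 10)).map (· * 10)).map (· * i)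
            = (f9Terms (PySem.Int.floordiv n 10)).map (· * (i * 10)) := by
          rw [List.map_map]
          apply List.map_congr_left
          intro t _
          simp only [Function.comp_apply]
          ring
        rw [List.map_append, List.reverse_append, hmap]
        simp
      · rw [f9Loop, if_neg h, f9Terms, if_pos (by omega)]
        simp

-- ===== VERDICT (by name: the statement is the Claim_ definition above) =====
theorem f9_spec : Claim_equal_f9 := by
  intro test _
  unfold Spec_f9 f9 f9_alt
  rw [f9Loop_eq_terms test.toNat test 1 [] le_rfl]
  simp
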